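-- pv_equiv track=rewrite | github.com/sadnanMohosin/codewars | 7 kyu/Printer Errors.py | printer_error
-- ===== SOURCE A (Python) =====
-- def printer_error(s):
--     # your code
--
--     available = 'abcdefghijklm'
--
--     numerator = 0
--     denominator = len(s)
--
--     for i in s:
--         if i not in available:
--             numerator +=1
--     return "{}/{}".format(numerator,denominator)
-- ===== SOURCE B (Python) =====
-- def printer_error(s):
--     # Build a frequency table of s once, then iterate over the 13 good letters:
--     # numerator = len(s) - (# of good-letter occurrences).
--     cnt = {}
--     for ch in s:
--         cnt[ch] = cnt.get(ch, 0) + 1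
--     good = 0
--     for c in 'abcdefghijklm':
--         good += cnt.get(c, 0)
--     return "{}/{}".format(len(s) - good, len(s))
-- ===== Notes on version B (the rewrite author's own statement) =====
-- stated objective: alternative
-- what changed: B builds a character-frequency table of s in one pass and then sums the counts of the 13 good letters 'a'-'m' over the alphabet (numerator = len(s) - good), instead of A's per-character substring-membership test against 'abcdefghijklm'.
import Mathlib
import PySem

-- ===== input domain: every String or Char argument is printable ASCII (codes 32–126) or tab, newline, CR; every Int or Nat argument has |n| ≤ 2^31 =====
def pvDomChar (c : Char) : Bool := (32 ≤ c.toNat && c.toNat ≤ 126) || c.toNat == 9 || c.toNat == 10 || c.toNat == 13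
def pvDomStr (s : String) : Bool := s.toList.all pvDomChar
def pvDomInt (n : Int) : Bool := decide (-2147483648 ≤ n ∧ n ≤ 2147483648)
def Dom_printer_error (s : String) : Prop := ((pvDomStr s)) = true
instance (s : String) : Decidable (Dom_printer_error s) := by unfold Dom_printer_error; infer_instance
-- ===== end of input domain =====

-- B builds a frequency table of s once and sums the counts of the 13 good letters
-- ('alternative' decomposition; same exact output).


-- ===== PORT A =====
-- for i in s: if i not in available: numerator += 1   ('i in available' for a
-- single char i is exactly char membership in available's characters)
def printer_error (s : String) : String :=
  let available : List Char := "abcdefghijklm".toList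
  let denominator : Int := PySem.Str.len s
  let numerator : Int :=
    s.toList.foldl (fun n i => if i ∈ available then n else n + 1) 0
  PySem.Int.toStr numerator ++ "/" ++ PySem.Int.toStr denominator

-- ===== PORT B =====
-- cnt = {}; for ch in s: cnt[ch] = cnt.get(ch, 0) + 1
-- good = 0; for c in 'abcdefghijklm': good += cnt.get(c, 0)
def printer_error_alt (s : String) : String :=
  let cnt : PySem.Dict Char Int :=
    s.toList.foldl (fun d ch => d.insert ch (d.getD ch 0 + 1)) PySem.Dict.empty
  let good : Int :=
    "abcdefghijklm".toList.foldl (fun g c => g + cnt.getD c 0) 0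
  PySem.Int.toStr (PySem.Str.len s - good) ++ "/" ++ PySem.Int.toStr (PySem.Str.len s)

-- ===== PRECONDITION & SPEC =====
def Spec_printer_error (s : String) (out : String) : Prop := out = printer_error_alt s
instance (s : String) (out : String) : Decidable (Spec_printer_error s out) := by unfold Spec_printer_error; infer_instance

-- ===== CLAIM =====
def Claim_equal_printer_error : Prop := ∀ (s : String), Dom_printer_error s → Spec_printer_error s (printer_error s)

-- ===== LEMMAS AND PROOFS =====

-- A's loop counts the characters outside the good list.
theorem pvAloop (avail : List Char) (l : List Char) (n : Int) :
    l.foldl (fun n i => if i ∈ avail then n else n + 1) n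
      = n + (l.countP (fun i => !decide (i ∈ avail)) : Int) := by
  induction l generalizing n with
  | nil => simp
  | cons x xs ih =>
    by_cases hx : x ∈ avail
    · simp [hx, ih]
    · simp only [List.foldl_cons, List.countP_cons, ih]
      simp [hx]
      ring

-- the per-letter indicator sums to the count
theorem pvMapIf (x : Char) (L : List Char) :
    (L.map fun c => (if x == c then (1:Int) else 0)).sum = (L.count x : Int) := by
  induction L with
  | nil => simp
  | cons y ys ih =>
    simp only [List.map_cons, List.sum_cons, ih]
    rw [List.count_cons]
    by_cases h : x = y
    · simp [h]
      ring
    · have h2 : (x == y) = false := by simp [h]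
      simp [h2, Ne.symm h]

-- sum over a nodup list of letters of the per-letter counts = count of members
theorem pvSumCounts (L : List Char) (hL : L.Nodup) (l : List Char) :
    (L.map (fun c => (l.count c : Int))).sum
      = (l.countP (fun i => decide (i ∈ L)) : Int) := by
  induction l with
  | nil => simp
  | cons x xs ih =>
    have hfun : (fun c => (((x :: xs).count c : Nat) : Int))
        = fun c => ((xs.count c : Nat) : Int) + (if x == c then (1:Int) else 0) := by
      funext c
      rw [List.count_cons]
      by_cases h : x = c
      · simp [h]
      · have h2 : (x == c) = false := by simp [h]
        simp [h2]
    rw [hfun, List.sum_map_add, pvMapIf, ih, List.countP_cons]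
    by_cases hx : x ∈ L
    · rw [List.count_eq_one_of_mem hL hx]
      simp [hx]
    · rw [List.count_eq_zero.mpr hx]
      simp [hx]

-- ===== VERDICT =====
theorem printer_error_spec : Claim_equal_printer_error := by
  intro s _
  unfold Spec_printer_error printer_error printer_error_alt
  simp only [PySem.Dict.foldl_insert_getD_add_one_eq_counter]
  rw [pvAloop]
  rw [PySem.List.foldl_add (l := "abcdefghijklm".toList)
      (g := fun c => (PySem.Dict.counter s.toList).getD c 0) (a := 0)]
  simp only [PySem.Dict.getD_counter]
  rw [pvSumCounts _ (by decide)]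
  have hlen : PySem.Str.len s = (s.toList.length : Int) := by
    simp [PySem.Str.len_eq]
  have hsplit : s.toList.countP (fun i => !decide (i ∈ "abcdefghijklm".toList))
      + s.toList.countP (fun i => decide (i ∈ "abcdefghijklm".toList))
      = s.toList.length := by
    have h := List.length_eq_countP_add_countP
        (p := fun i => decide (i ∈ "abcdefghijklm".toList)) (l := s.toList)
    have hneg : s.toList.countP (fun a => decide (¬ decide (a ∈ "abcdefghijklm".toList) = true))
        = s.toList.countP (fun i => !decide (i ∈ "abcdefghijklm".toList)) := by
      apply List.countP_congr
      intro a _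
      simp
    omega
  have hnum : (0 : Int) + (s.toList.countP (fun i => !decide (i ∈ "abcdefghijklm".toList)) : Int)
      = (s.toList.length : Int)
        - ((0 : Int) + (s.toList.countP (fun i => decide (i ∈ "abcdefghijklm".toList)) : Int)) := by
    omega
  rw [hlen, hnum]
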